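-- pv_equiv track=rewrite | github.com/cgdilley/AdventOfCode2017 | [Day03.0]SpiralMemory.py | find_val_in_layer
-- ===== SOURCE A (Python) =====
-- def l_to_s(l):
--     """
--     Finds the value whose square is the corner value of the given layer.
--     :param l: The layer to find the corner square of
--     :return: The corner square value
--     """
--
--     return (l * 2) + 1
--
-- def find_val_in_layer(val, lay):
--     size = l_to_s(lay)
--     root_corner = size ** 2
--     x = lay
--     y = lay
--
--     for side in range(4):
--         corner = root_corner - ((size - 1) * side)
--         if val >= corner:
--             return {
--                 0: (-x + (val - corner), y),
--                 1: (-x, -y + (val - corner)),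
--                 2: (-x + (val - corner), -y),
--                 3: (x, -y + (val - corner))
--             }[side]
--
--     return None
-- ===== SOURCE B (Python) =====
-- def find_val_in_layer(val, lay):
--     size = (lay * 2) + 1
--     root_corner = size ** 2
--     step = size - 1
--     if step <= 0:
--         # layer 0 (and degenerate negative layers): all side corners coincide or increase
--         return (-lay + (val - root_corner), lay) if val >= root_corner else None
--     d = root_corner - val
--     side = 0 if d <= 0 else -(-d // step)   # ceil(d / step)
--     if side > 3:
--         return None
--     off = val - (root_corner - step * side)
--     return [(-lay + off, lay), (-lay, -lay + off), (-lay + off, -lay), (lay, -lay + off)][side]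
-- ===== Notes on version B (the rewrite author's own statement) =====
-- stated objective: alternative
-- what changed: Replaces A's scan over the four sides (with a dict lookup per iteration) by a single closed-form ceiling-division computation of the side index, then one table index.
import Mathlib
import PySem

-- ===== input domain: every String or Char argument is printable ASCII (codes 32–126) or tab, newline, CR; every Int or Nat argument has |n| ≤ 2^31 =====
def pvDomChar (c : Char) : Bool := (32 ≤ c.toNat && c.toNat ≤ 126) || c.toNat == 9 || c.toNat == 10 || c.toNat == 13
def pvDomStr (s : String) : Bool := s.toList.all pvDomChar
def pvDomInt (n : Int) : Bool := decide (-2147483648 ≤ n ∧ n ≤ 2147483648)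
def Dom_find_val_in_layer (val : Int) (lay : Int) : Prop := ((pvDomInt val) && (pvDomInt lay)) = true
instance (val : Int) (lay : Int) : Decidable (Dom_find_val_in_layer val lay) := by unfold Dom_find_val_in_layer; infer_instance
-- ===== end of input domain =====

-- B replaces A's scan over the four sides by a single closed-form ceiling-division
-- computation of the side index (objective: alternative; same cost up to constants).

-- ===== PORT A =====
def l_to_s (l : Int) : Int := (l * 2) + 1

-- the body of A's `for side in range(4)` loop, recursing over the remaining sides
def fvil_loop (val root_corner size x y : Int) : List Int → Option (Int × Int)
  | [] => none
  | side :: rest =>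
      let corner := root_corner - ((size - 1) * side)
      if val ≥ corner then
        -- the dict lookup `{0:…,1:…,2:…,3:…}[side]`; side ∈ {0,1,2,3} so the key is always present
        ((PySem.Dict.ofList [(0, (-x + (val - corner), y)),
           (1, (-x, -y + (val - corner))),
           (2, (-x + (val - corner), -y)),
           (3, (x, -y + (val - corner)))] : PySem.Dict Int (Int × Int)).get? side)
      else fvil_loop val root_corner size x y rest

def find_val_in_layer (val : Int) (lay : Int) : Option (Int × Int) :=
  let size := l_to_s lay
  let root_corner := size ^ 2
  let x := lay
  let y := lay
  fvil_loop val root_corner size x y (PySem.List.pyRange 0 4 1)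

-- ===== PORT B =====
def find_val_in_layer_alt (val : Int) (lay : Int) : Option (Int × Int) :=
  let size := lay * 2 + 1
  let root_corner := size ^ 2
  let step := size - 1
  if step ≤ 0 then
    if val ≥ root_corner then some (-lay + (val - root_corner), lay) else none
  else
    let d := root_corner - val
    let side := if d ≤ 0 then 0 else -(PySem.Int.floordiv (-d) step)   -- ceil(d / step)
    if side > 3 then none
    else
      let off := val - (root_corner - step * side)
      -- the list indexing `[…][side]`; 0 ≤ side ≤ 3 so it is always in range
      PySem.List.pyGet? [(-lay + off, lay), (-lay, -lay + off), (-lay + off, -lay), (lay, -lay + off)] side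

-- ===== PRECONDITION & SPEC =====
def Spec_find_val_in_layer (val : Int) (lay : Int) (out : Option (Int × Int)) : Prop := out = find_val_in_layer_alt val lay
instance (val : Int) (lay : Int) (out : Option (Int × Int)) : Decidable (Spec_find_val_in_layer val lay out) := by unfold Spec_find_val_in_layer; infer_instance

-- ===== CLAIM (what is proved, stated in full; the proofs are below) =====
def Claim_equal_find_val_in_layer : Prop := ∀ (val : Int) (lay : Int), Dom_find_val_in_layer val lay → Spec_find_val_in_layer val lay (find_val_in_layer val lay)

-- ===== LEMMAS AND PROOFS =====
theorem fvil_eq (val lay : Int) : find_val_in_layer val lay = find_val_in_layer_alt val lay := by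
  unfold find_val_in_layer find_val_in_layer_alt l_to_s
  rw [show PySem.List.pyRange 0 4 1 = [0,1,2,3] from by decide]
  simp only [fvil_loop]
  have hs : lay * 2 + 1 - 1 = 2 * lay := by ring
  rw [hs]
  generalize hr : (lay * 2 + 1) ^ 2 = r
  by_cases hlay : 2 * lay ≤ 0
  · rw [if_pos hlay]
    by_cases h0 : val ≥ r - 2 * lay * 0
    · rw [if_pos h0, if_pos (show val ≥ r by omega)]
      show some _ = some _
      norm_num
    · rw [if_neg h0, if_neg (show ¬ val ≥ r - 2 * lay * 1 by omega),
          if_neg (show ¬ val ≥ r - 2 * lay * 2 by omega),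
          if_neg (show ¬ val ≥ r - 2 * lay * 3 by omega),
          if_neg (show ¬ val ≥ r by omega)]
  · rw [if_neg hlay]
    have hpos : (0:Int) < 2 * lay := by omega
    by_cases h0 : val ≥ r - 2 * lay * 0
    · rw [if_pos h0, if_pos (show r - val ≤ 0 by omega)]
      rw [if_neg (show ¬ (0:Int) > 3 by omega)]
      show some _ = some _
      norm_num
    · rw [if_neg h0]
      have hd : ¬ (r - val ≤ 0) := by omega
      rw [if_neg hd]
      obtain ⟨hq1, hq2⟩ := (PySem.Int.neg_floordiv_neg_eq_iff_of_pos (a := r - val) hpos).mp rfl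
      set q := -PySem.Int.floordiv (-(r - val)) (2 * lay) with hqdef
      by_cases h1 : val ≥ r - 2 * lay * 1
      · have hq : q = 1 := (PySem.Int.neg_floordiv_neg_eq_iff_of_pos hpos).mpr ⟨by omega, by omega⟩
        rw [if_pos h1, hq, if_neg (show ¬ (1:Int) > 3 by omega)]
        show some _ = some _
        norm_num
      · by_cases h2 : val ≥ r - 2 * lay * 2
        · have hq : q = 2 := (PySem.Int.neg_floordiv_neg_eq_iff_of_pos hpos).mpr ⟨by omega, by omega⟩
          rw [if_neg h1, if_pos h2, hq, if_neg (show ¬ (2:Int) > 3 by omega)]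
          show some _ = some _
          norm_num
        · by_cases h3 : val ≥ r - 2 * lay * 3
          · have hq : q = 3 := (PySem.Int.neg_floordiv_neg_eq_iff_of_pos hpos).mpr ⟨by omega, by omega⟩
            rw [if_neg h1, if_neg h2, if_pos h3, hq, if_neg (show ¬ (3:Int) > 3 by omega)]
            show some _ = some _
            norm_num
          · have hqge : q > 3 := by
              by_contra hle
              have : q * (2 * lay) ≤ 3 * (2 * lay) :=
                mul_le_mul_of_nonneg_right (by omega) (by omega)
              omega
            rw [if_neg h1, if_neg h2, if_neg h3, if_pos hqge]

-- ===== VERDICT (by name: the statement is the Claim_ definition above) =====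
theorem find_val_in_layer_spec : Claim_equal_find_val_in_layer := by
  intro val lay _
  exact fvil_eq val lay
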